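-- pv_equiv track=rewrite | github.com/jerrynabango/alx-higher_level_programming | 0x04-python-more_data_structures/102-complex_delete.py | complex_delete
-- ===== SOURCE A (Python) =====
-- def complex_delete(a_dictionary, value):
--     keys_to_del = []
--     for keys in a_dictionary:
--         if a_dictionary[keys] == value:
--             keys_to_del.append(keys)
--     for keys in keys_to_del:
--         del a_dictionary[keys]
--     return a_dictionary
-- ===== SOURCE B (Python) =====
-- def complex_delete(a_dictionary, value):
--     # Fixpoint loop: repeatedly find the FIRST key whose value matches and
--     # delete just that one entry, rescanning from scratch, until no key matches.
--     while True:
--         key = next((k for k in a_dictionary if a_dictionary[k] == value), None)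
--         if key is None:
--             return a_dictionary
--         del a_dictionary[key]
-- ===== Notes on version B (the rewrite author's own statement) =====
-- stated objective: alternative
-- what changed: B replaces A's two staged passes (collect every matching key into a list, then delete them all) by a fixpoint while-loop that each round rescans the dict for the first key whose value matches, deletes only that entry, and stops when a full scan finds no match; correctness rests on deletions preserving the order of the remaining entries.
import Mathlib
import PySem

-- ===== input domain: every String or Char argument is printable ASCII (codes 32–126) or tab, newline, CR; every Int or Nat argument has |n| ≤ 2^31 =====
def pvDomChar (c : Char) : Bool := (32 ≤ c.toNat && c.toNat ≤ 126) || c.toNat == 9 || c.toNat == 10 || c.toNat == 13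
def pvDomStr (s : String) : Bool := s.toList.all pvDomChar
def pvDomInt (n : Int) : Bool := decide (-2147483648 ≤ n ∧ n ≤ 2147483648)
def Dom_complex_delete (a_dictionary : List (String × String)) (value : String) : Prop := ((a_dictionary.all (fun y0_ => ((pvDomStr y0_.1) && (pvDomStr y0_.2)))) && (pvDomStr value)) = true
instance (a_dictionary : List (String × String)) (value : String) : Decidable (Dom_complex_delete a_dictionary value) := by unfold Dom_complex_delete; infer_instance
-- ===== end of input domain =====

-- B replaces A's collect-matching-keys-then-delete-them pass pair by a fixpoint while-loop
-- that repeatedly rescans for the first key whose value matches and deletes just that entry;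
-- both versions mutate the argument dict in place to the same final contents, and the equal
-- return value is what is proved here.


-- ===== PORT A =====
-- Two phases, as in A: iterate over the dict's keys collecting those whose value equals `value`,
-- then delete the collected keys one by one.  `a_dictionary[keys]` cannot raise (the keys come
-- from the dict itself), so the `getD` default "" is unreachable.
def complex_delete (a_dictionary : List (String × String)) (value : String) : List (String × String) :=
  let d := PySem.Dict.mk a_dictionary
  let keys_to_del := d.keys.foldl (fun acc k => if d.getD k "" == value then acc ++ [k] else acc) []
  (keys_to_del.foldl (fun dd k => dd.erase k) d).items

-- ===== PORT B =====
-- Source B: while True: key = next((k for k in d if d[k] == value), None); if None return; del d[key]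
-- `next(... , None)` over the dict's keys is `find?` on d.keys; `d[k]` cannot raise (k is a key).
def altFind (d : PySem.Dict String String) (value : String) : Option String :=
  d.keys.find? (fun k => d.getD k "" == value)

-- termination helper for the while loop: deleting a present key shrinks the dict
lemma erase_size_lt (d : PySem.Dict String String) (k : String)
    (hk : k ∈ d.keys) : (d.erase k).size < d.size := by
  simp only [PySem.Dict.erase, PySem.Dict.size]
  rw [List.length_filter_lt_length_iff_exists]
  rcases List.mem_map.mp hk with ⟨kv, hm, hfst⟩
  exact ⟨kv, hm, by simp [hfst]⟩

def altLoop (d : PySem.Dict String String) (value : String) : PySem.Dict String String :=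
  match hf : altFind d value with
  | none => d
  | some k => altLoop (d.erase k) value
termination_by d.size
decreasing_by
  exact erase_size_lt d k (List.mem_of_find?_eq_some hf)

def complex_delete_alt (a_dictionary : List (String × String)) (value : String) : List (String × String) :=
  (altLoop (PySem.Dict.mk a_dictionary) value).items

-- ===== PRECONDITION & SPEC =====
-- Pre_ requires distinct keys: a Python dict cannot hold a duplicate key, so an association list
-- with a repeated key encodes no actual input of A; no input A returns on is excluded.
def Pre_complex_delete (a_dictionary : List (String × String)) (_value : String) : Prop :=
  (a_dictionary.map Prod.fst).Nodup

instance (a_dictionary : List (String × String)) (value : String) : Decidable (Pre_complex_delete a_dictionary value) := by unfold Pre_complex_delete; infer_instance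

def pvWitness_complex_delete : (List (String × String)) × String := ([("a", "x"), ("b", "y")], "x")

def Spec_complex_delete (a_dictionary : List (String × String)) (value : String) (out : List (String × String)) : Prop := out = complex_delete_alt a_dictionary value
instance (a_dictionary : List (String × String)) (value : String) (out : List (String × String)) : Decidable (Spec_complex_delete a_dictionary value out) := by unfold Spec_complex_delete; infer_instance

-- ===== CLAIM (what is proved, stated in full; the proofs are below) =====
def Claim_equal_complex_delete : Prop := ∀ (a_dictionary : List (String × String)) (value : String), Dom_complex_delete a_dictionary value → Pre_complex_delete a_dictionary value → Spec_complex_delete a_dictionary value (complex_delete a_dictionary value)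

-- ===== LEMMAS AND PROOFS =====

-- each round of B's loop deletes one matching entry and changes no other, so the fixpoint
-- is exactly the value-filter of the dict's items (keys distinct throughout)
lemma altLoop_items_eq_filter (d : PySem.Dict String String) (v : String)
    (h : d.keys.Nodup) :
    (altLoop d v).items = d.items.filter (fun kv => !(kv.2 == v)) := by
  induction d using altLoop.induct v with
  | case1 d hfind =>
      rw [altLoop, hfind]
      symm
      apply List.filter_eq_self.mpr
      intro kv hm
      have hk : kv.1 ∈ d.keys := PySem.Dict.mem_keys_of_mem_items (d := d) hm
      have := List.find?_eq_none.mp hfind kv.1 hk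
      have hgd : d.getD kv.1 "" = kv.2 := PySem.Dict.getD_of_mem_items _ hm h ""
      simpa [hgd] using this
  | case2 d k hfind ih =>
      have hknd : (d.erase k).keys.Nodup := by
        simp only [PySem.Dict.erase, PySem.Dict.keys]
        exact h.sublist ((List.filter_sublist (l := d.items)).map Prod.fst)
      have hfind' : List.find? (fun k => d.getD k "" == v) d.keys = some k := by
        simpa [altFind] using hfind
      have hkv := List.find?_some hfind'
      rw [altLoop, hfind, ih hknd]
      simp only [PySem.Dict.erase, List.filter_filter]
      apply List.filter_congr
      intro kv hm
      by_cases hkk : kv.1 = k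
      · have : d.getD kv.1 "" = kv.2 := PySem.Dict.getD_of_mem_items _ hm h ""
        have hv2 : kv.2 = v := by rw [← this, hkk]; exact eq_of_beq (by simpa using hkv)
        simp [hv2]
      · simp [hkk]

-- folding `erase` over a key list filters out all entries carrying one of those keys
lemma foldl_erase_items (ks : List String) (d : PySem.Dict String String) :
    (ks.foldl (fun dd k => dd.erase k) d).items
      = d.items.filter (fun kv => !(ks.contains kv.1)) := by
  induction ks generalizing d with
  | nil => simp
  | cons k ks ih =>
      rw [List.foldl_cons, ih]
      simp only [PySem.Dict.erase, List.filter_filter]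
      apply List.filter_congr
      intro kv _
      simp [beq_eq_decide, Bool.and_comm, eq_comm]

-- A collects exactly the keys of the matching entries, and erasing them filters the dict.
lemma a_eq_filter (a : List (String × String)) (v : String)
    (h : (a.map Prod.fst).Nodup) :
    complex_delete a v = a.filter (fun kv => !(kv.2 == v)) := by
  unfold complex_delete
  dsimp only
  have hkeys : (PySem.Dict.mk a).keys = a.map Prod.fst := by
    simp [PySem.Dict.keys]
  have hnd : (PySem.Dict.mk a).keys.Nodup := by rw [hkeys]; exact h
  have hgetD : ∀ kv ∈ a, (PySem.Dict.mk a).getD kv.1 "" = kv.2 := by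
    intro kv hm
    exact PySem.Dict.getD_of_mem_items _ (by simpa [PySem.Dict.items] using hm) hnd ""
  have hktd : (PySem.Dict.mk a).keys.foldl
      (fun acc k => if (PySem.Dict.mk a).getD k "" == v then acc ++ [k] else acc) []
      = (a.filter (fun kv => kv.2 == v)).map Prod.fst := by
    have := PySem.List.foldl_append_if
      (fun k => (PySem.Dict.mk a).getD k "" == v) id (PySem.Dict.mk a).keys []
    simp only [id] at this
    rw [this, hkeys, List.filter_map, List.map_map]
    simp only [List.nil_append, Function.comp_def, id]
    congr 1
    apply List.filter_congr
    intro kv hm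
    simp [hgetD kv hm]
  rw [hktd, foldl_erase_items]
  show List.filter _ a = _
  apply List.filter_congr
  intro kv hm
  have hinj := List.inj_on_of_nodup_map h
  have : ((a.filter (fun kv => kv.2 == v)).map Prod.fst).contains kv.1 = (kv.2 == v) := by
    by_cases hv : kv.2 = v
    · simp only [hv, beq_self_eq_true]
      have : kv.1 ∈ (a.filter (fun kv => kv.2 == v)).map Prod.fst :=
        List.mem_map.mpr ⟨kv, List.mem_filter.mpr ⟨hm, by simp [hv]⟩, rfl⟩
      simpa using this
    · have hno : (kv.1, v) ∉ a := by
        intro hc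
        have heq := hinj hc hm rfl
        exact hv ((congrArg Prod.snd heq).symm)
      simp [hv, hno]
  rw [this]

-- ===== VERDICT (by name: the statement is the Claim_ definition above) =====
theorem complex_delete_spec : Claim_equal_complex_delete := by
  intro a v _ hpre
  unfold Spec_complex_delete
  have hnd : (PySem.Dict.mk a).keys.Nodup := by simpa [PySem.Dict.keys] using hpre
  rw [a_eq_filter a v hpre]
  unfold complex_delete_alt
  rw [altLoop_items_eq_filter _ _ hnd]
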